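-- pv_equiv track=rewrite | github.com/Yejin6911/Algorithm | 프로그래머스/PR_N으로표현.py | solution
-- ===== SOURCE A (Python) =====
-- def solution(N, number):
--     dp = []
--     answer = -1
--
--     for i in range(1, 9):
--         numbers = []
--         numbers.append(int(str(N)*i))
--
--         for j in range(0, i-1):
--             for x in dp[j]:
--                 for y in dp[i-1-j-1]:
--                     numbers.append(x+y)
--                     numbers.append(x-y)
--                     numbers.append(x*y)
--                     if y != 0:
--                         numbers.append(x//y)
--         if number in numbers:
--             answer = i
--             break
--
--         dp.append(numbers)
--
--     return answer
-- ===== SOURCE B (Python) =====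
-- def solution(N, number):
--     # Top-down recursion: reach(i) = distinct values expressible with exactly i copies
--     # of N.  Only the symmetric half of the splits (a <= i//2) is enumerated, and each
--     # pair contributes both orientations of the non-commutative operations.
--     def reach(i):
--         vals = {int(str(N) * i)}
--         for a in range(1, i // 2 + 1):
--             left = reach(a)
--             right = reach(i - a)
--             for x in left:
--                 for y in right:
--                     vals.add(x + y)
--                     vals.add(x - y)
--                     vals.add(y - x)
--                     vals.add(x * y)
--                     if y:
--                         vals.add(x // y)
--                     if x:
--                         vals.add(y // x)
--         return vals
--
--     for i in range(1, 9):
--         if number in reach(i):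
--             return i
--     return -1
-- ===== Notes on version B (the rewrite author's own statement) =====
-- stated objective: faster
-- what changed: A's bottom-up dp of lists that keep and recombine every duplicate is replaced by a top-down recursion computing, per count i, the SET of distinct reachable values, and only the symmetric half of the splits (a <= i//2) is enumerated with both orientations of the non-commutative operations emitted per pair.
import Mathlib
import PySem

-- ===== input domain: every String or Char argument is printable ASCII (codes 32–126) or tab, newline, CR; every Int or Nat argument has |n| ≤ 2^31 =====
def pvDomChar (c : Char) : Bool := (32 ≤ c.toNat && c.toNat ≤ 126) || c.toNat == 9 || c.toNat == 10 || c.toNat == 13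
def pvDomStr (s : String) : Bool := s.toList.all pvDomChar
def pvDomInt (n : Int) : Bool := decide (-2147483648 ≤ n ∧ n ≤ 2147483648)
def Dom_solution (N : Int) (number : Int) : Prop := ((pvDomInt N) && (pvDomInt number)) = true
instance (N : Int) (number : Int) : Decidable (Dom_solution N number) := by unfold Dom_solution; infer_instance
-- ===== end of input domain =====

-- B replaces A's bottom-up dp of duplicate-keeping lists by a top-down recursion over
-- SETS of distinct values that enumerates only the symmetric half of the splits
-- (a ≤ i//2), emitting both orientations of the non-commutative operations.

-- ===== PORT A =====
-- int(str(N)*i)  (shared helper: both Pythons compute this same expression).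
-- .getD 0 is a totality guard only: under Pre_ (N ≥ 0, or the i = 1 call) int() succeeds.
def pvRep (N : Int) (i : Nat) : Int :=
  (PySem.Int.ofChars? (PySem.List.pyRepeat (PySem.Int.toChars N) (i : Int))).getD 0

-- the `numbers` list built at loop index i from dp (A keeps duplicates; list.append = push).
-- dp[j] → getD j #[]: j ranges over range(i-1) and len(dp) = i-1 there, so always in range.
def numbersA (N : Int) (i : Nat) (dp : List (Array Int)) : Array Int :=
  (List.range (i - 1)).foldl (fun numbers j =>
      (dp.getD j #[]).foldl (fun numbers x =>
          (dp.getD (i - 1 - j - 1) #[]).foldl (fun numbers y =>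
              let numbers := numbers.push (x + y)
              let numbers := numbers.push (x - y)
              let numbers := numbers.push (x * y)
              if y ≠ 0 then numbers.push (PySem.Int.floordiv x y) else numbers)
            numbers)
        numbers)
    #[pvRep N i]

-- the for-i loop with its break and the answer variable; fuel = iterations left (range(1,9) has 8)
def loopA (N : Int) (number : Int) : Nat → Nat → List (Array Int) → Int
  | 0, _, _ => -1
  | fuel + 1, i, dp =>
      let numbers := numbersA N i dp
      if numbers.contains number then (i : Int)
      else loopA N number fuel (i + 1) (dp ++ [numbers])

def solution (N : Int) (number : Int) : Int := loopA N number 8 1 []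

-- ===== PORT B =====
-- Source B's reach(i): vals = {int(str(N)*i)}, then for a in range(1, i//2 + 1) (here a = j+1,
-- j ∈ range(i//2)) combine reach(a) with reach(i-a), adding both orientations of -, //.
-- Python set iteration order is not modelled; the fold only builds another Set, so the
-- result is order-independent (proved by the membership characterisation below).
def reachB (N : Int) (i : Nat) : PySem.Set Int :=
  ((List.range (i / 2)).attach).foldl (fun vals j =>
      let left := reachB N (j.1 + 1)
      let right := reachB N (i - (j.1 + 1))
      left.foldl (fun vals x =>
          right.foldl (fun vals y =>
              let vals := PySem.Set.add vals (x + y)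
              let vals := PySem.Set.add vals (x - y)
              let vals := PySem.Set.add vals (y - x)
              let vals := PySem.Set.add vals (x * y)
              let vals := if y ≠ 0 then PySem.Set.add vals (PySem.Int.floordiv x y) else vals
              if x ≠ 0 then PySem.Set.add vals (PySem.Int.floordiv y x) else vals)
            vals)
        vals)
    (PySem.Set.ofList [pvRep N i])
  termination_by i
  decreasing_by
  · have := j.2; simp only [List.mem_range] at this; omega
  · have := j.2; simp only [List.mem_range] at this; omega

-- Source B's top loop 'for i in range(1, 9): if number in reach(i): return i' with early return
def loopB (N : Int) (number : Int) : Nat → Nat → Int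
  | 0, _ => -1
  | fuel + 1, i =>
      if PySem.Set.contains (reachB N i) number then (i : Int)
      else loopB N number fuel (i + 1)

def solution_alt (N : Int) (number : Int) : Int := loopB N number 8 1

-- ===== PRECONDITION & SPEC =====
-- For N < 0 and number ≠ N BOTH Pythons raise ValueError at count 2: int(str(N)*2) parses
-- e.g. "-3-3".  (For number = N both return 1 before reaching it.)  Exactly those inputs
-- are excluded; Pre_ excludes no input on which A returns.
def Pre_solution (N : Int) (number : Int) : Prop := 0 ≤ N ∨ number = N
instance (N : Int) (number : Int) : Decidable (Pre_solution N number) := by unfold Pre_solution; infer_instance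
def pvWitness_solution : Int × Int := (5, 12)

def Spec_solution (N : Int) (number : Int) (out : Int) : Prop := out = solution_alt N number
instance (N : Int) (number : Int) (out : Int) : Decidable (Spec_solution N number out) := by unfold Spec_solution; infer_instance

-- ===== CLAIM (what is proved, stated in full; the proofs are below) =====
def Claim_equal_solution : Prop := ∀ (N : Int) (number : Int), Dom_solution N number → Pre_solution N number → Spec_solution N number (solution N number)

-- ===== LEMMAS AND PROOFS =====

-- generic membership through a foldl whose step adds exactly the elements characterised by Q
theorem mem_foldl_acc {α β : Type} [Membership Int β] (g : β → α → β) (Q : α → Int → Prop)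
    (hg : ∀ s a e, e ∈ g s a ↔ e ∈ s ∨ Q a e) :
    ∀ (l : List α) (s : β) (e : Int),
      e ∈ l.foldl g s ↔ e ∈ s ∨ ∃ a ∈ l, Q a e := by
  intro l
  induction l with
  | nil => simp
  | cons a l ih =>
      intro s e
      simp [List.foldl_cons, ih, hg]
      tauto

-- the values one ORDERED (x, y) pair contributes in A (the loop body's three/four pushes)
def pairVals (x y : Int) : List Int :=
  [x + y, x - y, x * y] ++ (if y ≠ 0 then [PySem.Int.floordiv x y] else [])

theorem mem_push_step (x y : Int) (numbers : Array Int) (e : Int) :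
    (e ∈ (let n1 := numbers.push (x + y)
          let n2 := n1.push (x - y)
          let n3 := n2.push (x * y)
          if y ≠ 0 then n3.push (PySem.Int.floordiv x y) else n3))
      ↔ e ∈ numbers ∨ e ∈ pairVals x y := by
  simp only [pairVals]
  split <;> simp [Array.mem_push] <;> tauto

theorem mem_numbersA (N : Int) (i : Nat) (dp : List (Array Int)) (e : Int) :
    e ∈ numbersA N i dp ↔
      e = pvRep N i ∨ ∃ j ∈ List.range (i - 1),
        ∃ x ∈ dp.getD j #[], ∃ y ∈ dp.getD (i - 1 - j - 1) #[], e ∈ pairVals x y := by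
  have h2 : ∀ (x : Int) (arr : Array Int) (s : Array Int) (e : Int),
      e ∈ arr.foldl (fun cand y =>
            let cand := cand.push (x + y)
            let cand := cand.push (x - y)
            let cand := cand.push (x * y)
            if y ≠ 0 then cand.push (PySem.Int.floordiv x y) else cand) s
        ↔ e ∈ s ∨ ∃ y ∈ arr, e ∈ pairVals x y := by
    intro x arr s e
    rw [← Array.foldl_toList,
        mem_foldl_acc _ (fun y e => e ∈ pairVals x y) (fun s y e => mem_push_step x y s e)]
    simp
  have h1 : ∀ (jx : Nat) (arr : Array Int) (s : Array Int) (e : Int),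
      e ∈ arr.foldl (fun cand x =>
            (dp.getD jx #[]).foldl (fun cand y =>
                let cand := cand.push (x + y)
                let cand := cand.push (x - y)
                let cand := cand.push (x * y)
                if y ≠ 0 then cand.push (PySem.Int.floordiv x y) else cand) cand) s
        ↔ e ∈ s ∨ ∃ x ∈ arr, ∃ y ∈ dp.getD jx #[], e ∈ pairVals x y := by
    intro jx arr s e
    rw [← Array.foldl_toList,
        mem_foldl_acc _ (fun x e => ∃ y ∈ dp.getD jx #[], e ∈ pairVals x y)
          (fun s x e => h2 x _ s e)]
    simp
  unfold numbersA
  rw [mem_foldl_acc _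
      (fun j e => ∃ x ∈ dp.getD j #[], ∃ y ∈ dp.getD (i - 1 - j - 1) #[], e ∈ pairVals x y)
      (fun s j e => h1 (i - 1 - j - 1) _ s e)]
  simp

-- B's inner body for the pair (x, y) adds exactly both orientations of A's pairVals
theorem mem_addsB (x y : Int) (vals : PySem.Set Int) (e : Int) :
    (e ∈ (let v1 := PySem.Set.add vals (x + y)
          let v2 := PySem.Set.add v1 (x - y)
          let v3 := PySem.Set.add v2 (y - x)
          let v4 := PySem.Set.add v3 (x * y)
          let v5 := if y ≠ 0 then PySem.Set.add v4 (PySem.Int.floordiv x y) else v4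
          if x ≠ 0 then PySem.Set.add v5 (PySem.Int.floordiv y x) else v5))
      ↔ e ∈ vals ∨ (e ∈ pairVals x y ∨ e ∈ pairVals y x) := by
  simp only [pairVals]
  split_ifs <;>
    simp [PySem.Set.mem_add, Int.add_comm y x, Int.mul_comm y x] <;> tauto

-- membership characterisation of reach(i)
theorem mem_reachB (N : Int) (i : Nat) (e : Int) :
    e ∈ reachB N i ↔
      e = pvRep N i ∨ ∃ j < i / 2,
        ∃ x ∈ reachB N (j + 1), ∃ y ∈ reachB N (i - (j + 1)),
          (e ∈ pairVals x y ∨ e ∈ pairVals y x) := by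
  have h2 : ∀ (x : Int) (l : List Int) (s : PySem.Set Int) (e : Int),
      e ∈ l.foldl (fun vals y =>
            let vals := PySem.Set.add vals (x + y)
            let vals := PySem.Set.add vals (x - y)
            let vals := PySem.Set.add vals (y - x)
            let vals := PySem.Set.add vals (x * y)
            let vals := if y ≠ 0 then PySem.Set.add vals (PySem.Int.floordiv x y) else vals
            if x ≠ 0 then PySem.Set.add vals (PySem.Int.floordiv y x) else vals) s
        ↔ e ∈ s ∨ ∃ y ∈ l, (e ∈ pairVals x y ∨ e ∈ pairVals y x) :=
    fun x l s e =>
      mem_foldl_acc _ (fun y e => e ∈ pairVals x y ∨ e ∈ pairVals y x)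
        (fun s y e => mem_addsB x y s e) l s e
  have h1 : ∀ (L R : List Int) (s : PySem.Set Int) (e : Int),
      e ∈ L.foldl (fun vals x =>
            R.foldl (fun vals y =>
                let vals := PySem.Set.add vals (x + y)
                let vals := PySem.Set.add vals (x - y)
                let vals := PySem.Set.add vals (y - x)
                let vals := PySem.Set.add vals (x * y)
                let vals := if y ≠ 0 then PySem.Set.add vals (PySem.Int.floordiv x y) else vals
                if x ≠ 0 then PySem.Set.add vals (PySem.Int.floordiv y x) else vals) vals) s
        ↔ e ∈ s ∨ ∃ x ∈ L, ∃ y ∈ R, (e ∈ pairVals x y ∨ e ∈ pairVals y x) :=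
    fun L R s e =>
      mem_foldl_acc _ (fun x e => ∃ y ∈ R, (e ∈ pairVals x y ∨ e ∈ pairVals y x))
        (fun s x e => h2 x R s e) L s e
  rw [reachB]
  rw [mem_foldl_acc _
      (fun (j : {x // x ∈ List.range (i / 2)}) e =>
        ∃ x ∈ reachB N (j.1 + 1), ∃ y ∈ reachB N (i - (j.1 + 1)),
          (e ∈ pairVals x y ∨ e ∈ pairVals y x))
      (fun s j e => h1 _ _ s e)]
  simp [PySem.Set.mem_ofList]

-- the symmetric half-range enumeration reaches the same values as the full range
theorem half_range (i : Nat) (R : Nat → List Int) (e : Int) :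
    (∃ a, 1 ≤ a ∧ a < i ∧ ∃ x ∈ R a, ∃ y ∈ R (i - a), e ∈ pairVals x y) ↔
    (∃ a, 1 ≤ a ∧ a ≤ i / 2 ∧ ∃ x ∈ R a, ∃ y ∈ R (i - a),
        (e ∈ pairVals x y ∨ e ∈ pairVals y x)) := by
  constructor
  · rintro ⟨a, h1, h2, x, hx, y, hy, he⟩
    by_cases hha : a ≤ i / 2
    · exact ⟨a, h1, hha, x, hx, y, hy, Or.inl he⟩
    · refine ⟨i - a, by omega, by omega, y, hy, x, ?_, Or.inr he⟩
      rw [show i - (i - a) = a by omega]; exact hx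
  · rintro ⟨a, h1, h2, x, hx, y, hy, he | he⟩
    · exact ⟨a, h1, by omega, x, hx, y, hy, he⟩
    · refine ⟨i - a, by omega, by omega, y, hy, x, ?_, he⟩
      rw [show i - (i - a) = a by omega]; exact hx

-- bridge: under the loop invariant, A's level-i list holds exactly the values of reach(i)
theorem mem_numbersA_iff_reachB (N : Int) (i : Nat) (dpA : List (Array Int))
    (hlen : dpA.length + 1 = i)
    (hdp : ∀ j, j < dpA.length → ∀ e, (e ∈ dpA.getD j #[] ↔ e ∈ reachB N (j + 1))) :
    ∀ e, e ∈ numbersA N i dpA ↔ e ∈ reachB N i := by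
  intro e
  rw [mem_numbersA, mem_reachB]
  apply or_congr Iff.rfl
  have hA : (∃ j ∈ List.range (i - 1),
        ∃ x ∈ dpA.getD j #[], ∃ y ∈ dpA.getD (i - 1 - j - 1) #[], e ∈ pairVals x y)
      ↔ (∃ a, 1 ≤ a ∧ a < i ∧ ∃ x ∈ reachB N a, ∃ y ∈ reachB N (i - a), e ∈ pairVals x y) := by
    constructor
    · rintro ⟨j, hj, x, hx, y, hy, he⟩
      simp only [List.mem_range] at hj
      refine ⟨j + 1, by omega, by omega, x, ?_, y, ?_, he⟩
      · rw [← hdp j (by omega)]; exact hx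
      · rw [show i - (j + 1) = i - 1 - j - 1 + 1 by omega, ← hdp (i - 1 - j - 1) (by omega)]
        exact hy
    · rintro ⟨a, h1, h2, x, hx, y, hy, he⟩
      refine ⟨a - 1, by simp only [List.mem_range]; omega, x, ?_, y, ?_, he⟩
      · rw [hdp (a - 1) (by omega), show a - 1 + 1 = a by omega]; exact hx
      · rw [hdp (i - 1 - (a - 1) - 1) (by omega),
            show i - 1 - (a - 1) - 1 + 1 = i - a by omega]
        exact hy
  have hB : (∃ j < i / 2,
        ∃ x ∈ reachB N (j + 1), ∃ y ∈ reachB N (i - (j + 1)),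
          (e ∈ pairVals x y ∨ e ∈ pairVals y x))
      ↔ (∃ a, 1 ≤ a ∧ a ≤ i / 2 ∧ ∃ x ∈ reachB N a, ∃ y ∈ reachB N (i - a),
          (e ∈ pairVals x y ∨ e ∈ pairVals y x)) := by
    constructor
    · rintro ⟨j, hj, x, hx, y, hy, he⟩
      exact ⟨j + 1, by omega, by omega, x, hx, y, hy, he⟩
    · rintro ⟨a, h1, h2, x, hx, y, hy, he⟩
      refine ⟨a - 1, by omega, x, ?_, y, ?_, he⟩
      · rw [show a - 1 + 1 = a by omega]; exact hx
      · rw [show i - (a - 1 + 1) = i - a by omega]; exact hy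
  exact hA.trans ((half_range i (fun a => reachB N a) e).trans hB.symm)

-- the two loops agree while the invariant holds
theorem loop_eq (N : Int) (number : Int) :
    ∀ (fuel i : Nat) (dpA : List (Array Int)),
      dpA.length + 1 = i →
      (∀ j, j < dpA.length → ∀ e, (e ∈ dpA.getD j #[] ↔ e ∈ reachB N (j + 1))) →
      loopA N number fuel i dpA = loopB N number fuel i := by
  intro fuel
  induction fuel with
  | zero => intro i dpA _ _; rfl
  | succ fuel ih =>
      intro i dpA hlen hdp
      have hmem := mem_numbersA_iff_reachB N i dpA hlen hdp
      show (if (numbersA N i dpA).contains number then (i : Int)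
            else loopA N number fuel (i + 1) (dpA ++ [numbersA N i dpA]))
         = (if PySem.Set.contains (reachB N i) number then (i : Int)
            else loopB N number fuel (i + 1))
      have hc : (numbersA N i dpA).contains number
              = PySem.Set.contains (reachB N i) number := by
        rw [Bool.eq_iff_iff, PySem.Set.contains_iff]
        simpa using hmem number
      rw [hc]
      split
      · rfl
      · refine ih (i + 1) _ (by simp; omega) ?_
        intro j hj e
        simp only [List.length_append, List.length_cons, List.length_nil] at hj
        rcases Nat.lt_or_ge j dpA.length with h | h
        · rw [List.getD_eq_getElem?_getD, List.getElem?_append_left h,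
              ← List.getD_eq_getElem?_getD]
          exact hdp j h e
        · have hj' : j = dpA.length := by omega
          subst hj'
          rw [List.getD_eq_getElem?_getD, List.getElem?_append_right (le_refl _)]
          simpa [hlen] using hmem e

-- ===== VERDICT (by name: the statement is the Claim_ definition above) =====
theorem solution_spec : Claim_equal_solution := by
  intro N number _ _
  show solution N number = solution_alt N number
  exact loop_eq N number 8 1 [] rfl (by intro j hj; simp at hj)
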